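-- pv_equiv track=rewrite | github.com/Uber-Career-Prep-2023/Uber-Career-Prep-Lauren-Escarcha | Assignment 3/FirstKBinaryNumbers.py | first_k_binary
-- ===== SOURCE A (Python) =====
-- from collections import deque
--
-- def first_k_binary(k):
--     if k <= 0: return []
--
--     res = ['0']
--     q = deque()
--     q.append('1')
--
--     while len(res) < k:
--         num = q.popleft()
--         if num:
--             res.append(num)
--         q.append(num + '0')
--         q.append(num + '1')
--
--     return res
-- ===== SOURCE B (Python) =====
-- def first_k_binary(k):
--     return [bin(i)[2:] for i in range(k)]
-- ===== Notes on version B (the rewrite author's own statement) =====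
-- stated objective: idiomatic
-- what changed: Replaced the BFS/deque incremental prefix-building of binary strings with a single comprehension converting each i in range(k) independently via bin(i)[2:].
import Mathlib
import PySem

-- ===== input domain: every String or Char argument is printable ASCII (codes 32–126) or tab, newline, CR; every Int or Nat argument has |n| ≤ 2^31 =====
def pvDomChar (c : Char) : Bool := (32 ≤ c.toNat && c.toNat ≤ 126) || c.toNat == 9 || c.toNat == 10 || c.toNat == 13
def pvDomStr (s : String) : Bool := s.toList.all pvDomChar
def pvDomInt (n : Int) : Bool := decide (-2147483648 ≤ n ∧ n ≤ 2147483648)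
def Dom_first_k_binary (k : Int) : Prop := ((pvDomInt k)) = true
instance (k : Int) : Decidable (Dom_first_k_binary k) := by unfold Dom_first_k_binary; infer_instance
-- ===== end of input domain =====

-- B replaces A's BFS/deque generation of binary strings by an independent
-- per-element conversion of each i in range(k) — idiomatic, same cost.


-- ===== PORT A =====
-- the while loop: res/q are the state; fuel = k.toNat iterations always suffice
-- (each step appends one element to res, which starts at length 1), and Python
-- never reaches the fuel-exhausted branch.
def firstKLoop (k : Int) (fuel : Nat) (res q : List String) : List String :=
  match fuel with
  | 0 => res
  | f + 1 =>
    if (res.length : Int) < k then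
      match q with
      | [] => res   -- unreachable: the deque is never empty (pop 1, push 2)
      | num :: qs =>
        let res' := if num ≠ "" then res ++ [num] else res
        firstKLoop k f res' (qs ++ [num ++ "0", num ++ "1"])
    else res

def first_k_binary (k : Int) : List String :=
  if k ≤ 0 then [] else firstKLoop k k.toNat ["0"] ["1"]

-- ===== PORT B =====
-- bin(i)[2:] for i ≥ 0 is PySem.Int.toBin (format(i, 'b'))
def first_k_binary_alt (k : Int) : List String :=
  (PySem.List.pyRange 0 k 1).map PySem.Int.toBin

-- ===== PRECONDITION & SPEC =====
def Spec_first_k_binary (k : Int) (out : List String) : Prop := out = first_k_binary_alt k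
instance (k : Int) (out : List String) : Decidable (Spec_first_k_binary k out) := by unfold Spec_first_k_binary; infer_instance

-- ===== CLAIM (what is proved, stated in full; the proofs are below) =====
def Claim_equal_first_k_binary : Prop := ∀ (k : Int), Dom_first_k_binary k → Spec_first_k_binary k (first_k_binary k)

-- ===== LEMMAS AND PROOFS =====

-- binary digits of n, most significant first ('0' for n = 0); matches Nat.toDigits 2
def bdigits (n : Nat) : List Char :=
  if n / 2 = 0 then [Nat.digitChar (n % 2)]
  else bdigits (n / 2) ++ [Nat.digitChar (n % 2)]
  termination_by n
  decreasing_by exact Nat.div_lt_self (by omega) one_lt_two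

lemma toDigitsCore_eq_bdigits :
    ∀ (f n : Nat), n < 2 ^ f → ∀ ds, Nat.toDigitsCore 2 (f + 1) n ds = bdigits n ++ ds := by
  intro f
  induction f with
  | zero =>
    intro n hn ds
    have h0 : n = 0 := by omega
    subst h0
    rw [bdigits]
    simp [Nat.toDigitsCore]
  | succ f ih =>
    intro n hn ds
    rw [Nat.toDigitsCore]
    by_cases h : n / 2 = 0
    · rw [bdigits]; simp [h]
    · have h2 : n / 2 < 2 ^ f := by
        rw [Nat.div_lt_iff_lt_mul (by norm_num)]
        calc n < 2 ^ (f + 1) := hn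
          _ = 2 ^ f * 2 := by ring
      rw [bdigits]
      simp only [h, if_false]
      rw [ih (n / 2) h2]
      simp

lemma toDigits_two_eq_bdigits (n : Nat) : Nat.toDigits 2 n = bdigits n := by
  have := toDigitsCore_eq_bdigits n n Nat.lt_two_pow_self []
  simpa [Nat.toDigits] using this

lemma bdigits_ne_nil (n : Nat) : bdigits n ≠ [] := by
  rw [bdigits]; split <;> simp

lemma bdigits_double (n : Nat) (hn : 1 ≤ n) : bdigits (2 * n) = bdigits n ++ ['0'] := by
  conv_lhs => rw [bdigits]
  have h1 : 2 * n / 2 = n := by omega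
  have h2 : 2 * n % 2 = 0 := by omega
  simp [h1, h2, Nat.digitChar, if_neg (by omega : ¬ n = 0)]

lemma bdigits_double_add_one (n : Nat) (hn : 1 ≤ n) :
    bdigits (2 * n + 1) = bdigits n ++ ['1'] := by
  conv_lhs => rw [bdigits]
  have h1 : (2 * n + 1) / 2 = n := by omega
  have h2 : (2 * n + 1) % 2 = 1 := by omega
  simp [h1, h2, Nat.digitChar, if_neg (by omega : ¬ n = 0)]

-- the value both programs emit for index m
def bstr (m : Nat) : String := String.ofList (bdigits m)

lemma toBin_natCast (m : Nat) : PySem.Int.toBin (m : Int) = bstr m := by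
  simp [PySem.Int.toBin, PySem.Int.toBinChars, bstr,
    if_neg (by omega : ¬ (m : Int) < 0), toDigits_two_eq_bdigits]

lemma bstr_ne_empty (m : Nat) : bstr m ≠ "" := by
  intro h
  have := congrArg String.toList h
  simp [bstr] at this
  exact bdigits_ne_nil m this

lemma bstr_append_zero (n : Nat) (hn : 1 ≤ n) : bstr n ++ "0" = bstr (2 * n) := by
  apply String.toList_injective
  have : ("0" : String) = String.ofList ['0'] := by decide
  simp [bstr, this, String.toList_append, bdigits_double n hn]

lemma bstr_append_one (n : Nat) (hn : 1 ≤ n) : bstr n ++ "1" = bstr (2 * n + 1) := by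
  apply String.toList_injective
  have : ("1" : String) = String.ofList ['1'] := by decide
  simp [bstr, this, String.toList_append, bdigits_double_add_one n hn]

-- loop invariant: after emitting 0..n-1, the queue holds n..2n-1
lemma firstKLoop_invariant (k : Int) (K : Nat) (hK : k.toNat = K) :
    ∀ (fuel n : Nat), 1 ≤ n → n ≤ K → K ≤ n + fuel →
      firstKLoop k fuel ((List.range n).map bstr) ((List.range' n n).map bstr) =
        (List.range K).map bstr := by
  intro fuel
  induction fuel with
  | zero =>
    intro n h1 h2 h3
    have : n = K := by omega
    simp [firstKLoop, this]
  | succ f ih =>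
    intro n h1 h2 h3
    by_cases hlt : n < K
    · have hk1 : (1:Int) ≤ k := by omega
      have hcond : (((List.range n).map bstr).length : Int) < k := by
        simp only [List.length_map, List.length_range]; omega
      have hq : List.range' n n = n :: List.range' (n + 1) (n - 1) := by
        rw [show n = (n - 1) + 1 from by omega]
        rw [List.range'_succ]
        congr 2
      simp only [firstKLoop]
      rw [if_pos hcond, hq]
      simp only [List.map_cons]
      rw [if_pos (bstr_ne_empty n)]
      have hres : (List.range n).map bstr ++ [bstr n] = (List.range (n + 1)).map bstr := by
        rw [List.range_succ, List.map_append, List.map_cons, List.map_nil]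
      have hqueue : (List.range' (n + 1) (n - 1)).map bstr ++ [bstr n ++ "0", bstr n ++ "1"]
          = (List.range' (n + 1) (n + 1)).map bstr := by
        rw [bstr_append_zero n h1, bstr_append_one n h1]
        have h2r : List.range' (2 * n) 2 = [2 * n, 2 * n + 1] := by
          simp [List.range'_succ]
        have := List.range'_append (s := n + 1) (m := n - 1) (n := 2) (step := 1)
        rw [show (n + 1) + 1 * (n - 1) = 2 * n from by omega, h2r] at this
        rw [show (n - 1) + 2 = n + 1 from by omega] at this
        rw [← this, List.map_append]; simp
      rw [hres, hqueue]
      exact ih (n + 1) (by omega) (by omega) (by omega)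
    · have hn : n = K := by omega
      simp only [firstKLoop]
      rw [if_neg (by simp only [List.length_map, List.length_range]; omega)]
      rw [hn]

-- ===== VERDICT (by name: the statement is the Claim_ definition above) =====
theorem first_k_binary_spec : Claim_equal_first_k_binary := by
  intro k _
  unfold Spec_first_k_binary first_k_binary first_k_binary_alt
  by_cases hk : k ≤ 0
  · rw [if_pos hk, PySem.List.pyRange_one_eq_nil hk]
    simp
  · rw [if_neg hk]
    have hstart : (["0"] : List String) = (List.range 1).map bstr := by
      simp [List.range_succ, bstr]
      apply String.toList_injective
      rw [bdigits]
      decide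
    have hq0 : (["1"] : List String) = (List.range' 1 1).map bstr := by
      simp [bstr]
      apply String.toList_injective
      rw [bdigits]
      decide
    rw [hstart, hq0,
      firstKLoop_invariant k k.toNat rfl k.toNat 1 le_rfl (by omega) (by omega)]
    rw [PySem.List.pyRange_one, List.map_map, Int.sub_zero]
    symm
    apply List.map_congr_left
    intro m _
    simp [toBin_natCast]
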